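-- pv_equiv track=rewrite | github.com/magpayang/pygame_visualization_2 | SortingAlgo.py | insertion_sort_one_pass
-- ===== SOURCE A (Python) =====
-- def insertion_sort_one_pass(input_array, idx):
--     current = input_array[idx]
--     increment = 0
--     while (input_array[idx - 1 - increment] > current) and (idx - 1 - increment >= 0):
--         input_array[idx - increment] = input_array[idx - 1 - increment]
--         increment += 1
--
--     input_array[idx - 1 - increment + 1] = current
--     return input_array, idx
-- ===== SOURCE B (Python) =====
-- def insertion_sort_one_pass(input_array, idx):
--     current = input_array[idx]
--     pos = idx
--     while pos > 0 and input_array[pos - 1] > current: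
--         pos -= 1
--     input_array[pos + 1:idx + 1] = input_array[pos:idx]
--     input_array[pos] = current
--     return input_array, idx
-- ===== Notes on version B (the rewrite author's own statement) =====
-- stated objective: alternative
-- what changed: A interleaves scanning and element-by-element shifting in one while loop; B first locates the insertion position with a non-mutating leftward scan, then moves the whole block with a single slice assignment and writes current once.
import Mathlib
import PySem

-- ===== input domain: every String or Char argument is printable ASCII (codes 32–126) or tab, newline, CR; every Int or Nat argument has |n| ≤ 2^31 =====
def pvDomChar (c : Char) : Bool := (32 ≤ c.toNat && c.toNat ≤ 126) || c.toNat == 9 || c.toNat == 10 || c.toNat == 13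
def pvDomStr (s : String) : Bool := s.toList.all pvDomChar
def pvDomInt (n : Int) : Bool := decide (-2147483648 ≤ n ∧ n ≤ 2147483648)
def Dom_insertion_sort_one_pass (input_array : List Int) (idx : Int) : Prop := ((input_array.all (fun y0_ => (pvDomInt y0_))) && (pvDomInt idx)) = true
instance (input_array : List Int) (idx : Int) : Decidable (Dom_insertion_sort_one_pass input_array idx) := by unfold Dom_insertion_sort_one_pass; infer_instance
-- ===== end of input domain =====

-- B separates A's interleaved scan-and-shift into a locate phase plus one bulk slice move (objective:
-- alternative decomposition, same cost). Both A and B mutate input_array in place in Python; the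
-- equivalence proved here is about the RETURN value.

-- ===== PORT A =====
-- A's while loop; state = (input_array, increment). The read input_array[idx-1-increment] uses
-- Python indexing (pyGet?); none = IndexError (Python raises there, outside Pre_), we stop.
def pvALoop (a : List Int) (current : Int) (idx : Int) (inc : Int) : List Int × Int :=
  match PySem.List.pyGet? a (idx - 1 - inc) with
  | none => (a, inc)  -- IndexError in Python (outside Pre_)
  | some v =>
    if v > current ∧ idx - 1 - inc ≥ 0 then
      pvALoop (PySem.List.pySetD a (idx - inc) v) current idx (inc + 1)
    else (a, inc)
termination_by (idx - inc).toNat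
decreasing_by omega

def insertion_sort_one_pass (input_array : List Int) (idx : Int) : List Int × Int :=
  match PySem.List.pyGet? input_array idx with
  | none => (input_array, idx)  -- IndexError in Python (outside Pre_)
  | some current =>
    let r := pvALoop input_array current idx 0
    (PySem.List.pySetD r.1 (idx - 1 - r.2 + 1) current, idx)

-- ===== PORT B =====
-- B's locate phase: pos = idx; while pos > 0 and input_array[pos-1] > current: pos -= 1
def pvBScan (a : List Int) (current : Int) (pos : Int) : Int :=
  if h : pos > 0 then
    match PySem.List.pyGet? a (pos - 1) with
    | none => pos  -- IndexError in Python (outside Pre_)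
    | some v => if v > current then pvBScan a current (pos - 1) else pos
  else pos
termination_by pos.toNat
decreasing_by omega

def insertion_sort_one_pass_alt (input_array : List Int) (idx : Int) : List Int × Int :=
  match PySem.List.pyGet? input_array idx with
  | none => (input_array, idx)  -- IndexError in Python (outside Pre_)
  | some current =>
    let pos := pvBScan input_array current idx
    -- slice assignment input_array[pos+1:idx+1] = input_array[pos:idx], ported by hand as
    -- prefix ++ moved segment ++ suffix; exact here since pos ≤ idx (the scan only decrements).
    let a1 := PySem.List.slice input_array none (some (pos + 1))
              ++ PySem.List.slice input_array (some pos) (some idx)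
              ++ PySem.List.slice input_array (some (idx + 1)) none
    (PySem.List.pySetD a1 pos current, idx)

-- ===== PRECONDITION & SPEC =====
-- Pre_ excludes exactly the inputs where Python A raises IndexError: idx out of range for
-- input_array[idx], and idx = -len(input_array), where A's loop-condition read input_array[idx-1]
-- is out of range.
def Pre_insertion_sort_one_pass (input_array : List Int) (idx : Int) : Prop :=
  -(input_array.length : Int) < idx ∧ idx < (input_array.length : Int)
instance (input_array : List Int) (idx : Int) : Decidable (Pre_insertion_sort_one_pass input_array idx) := by unfold Pre_insertion_sort_one_pass; infer_instance

def pvWitness_insertion_sort_one_pass : List Int × Int := ([3, 1, 2], 1)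

def Spec_insertion_sort_one_pass (input_array : List Int) (idx : Int) (out : List Int × Int) : Prop := out = insertion_sort_one_pass_alt input_array idx
instance (input_array : List Int) (idx : Int) (out : List Int × Int) : Decidable (Spec_insertion_sort_one_pass input_array idx out) := by unfold Spec_insertion_sort_one_pass; infer_instance

-- ===== CLAIM (what is proved, stated in full; the proofs are below) =====
def Claim_equal_insertion_sort_one_pass : Prop := ∀ (input_array : List Int) (idx : Int), Dom_insertion_sort_one_pass input_array idx → Pre_insertion_sort_one_pass input_array idx → Spec_insertion_sort_one_pass input_array idx (insertion_sort_one_pass input_array idx)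

-- ===== LEMMAS AND PROOFS =====

-- The common insertion position: leftward scan from p while the element to the left exceeds x.
def pvFindPos (P : List Int) (x : Int) : Nat → Nat
  | 0 => 0
  | p + 1 => if P.getD p 0 > x then pvFindPos P x p else p + 1

theorem pvFindPos_le (P : List Int) (x : Int) : ∀ p, pvFindPos P x p ≤ p := by
  intro p
  induction p with
  | zero => simp [pvFindPos]
  | succ q ih =>
    simp only [pvFindPos]
    split
    · omega
    · exact Nat.le_refl _

-- B's scan computes pvFindPos.
theorem pvBScan_eq (P S : List Int) (x : Int) :
    ∀ (p : Nat), p ≤ P.length →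
      pvBScan (P ++ x :: S) x (p : Int) = ((pvFindPos P x p : Nat) : Int) := by
  intro p
  induction p with
  | zero => intro _; rw [pvBScan]; norm_num [pvFindPos]
  | succ p ih =>
    intro hp
    rw [pvBScan]
    have h1 : (((p+1 : Nat) : Int)) - 1 = (p : Int) := by push_cast; ring
    have hlt : p < P.length := by omega
    rw [dif_pos (by exact_mod_cast Nat.succ_pos p), h1, PySem.List.pyGet?_natCast,
        List.getElem?_append_left hlt]
    simp only [List.getElem?_eq_getElem hlt]
    have hgd : P.getD p 0 = P[p] := List.getD_eq_getElem P 0 hlt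
    by_cases hc : P[p] > x
    · rw [if_pos hc]
      simp only [pvFindPos, hgd, if_pos hc]
      exact ih (by omega)
    · rw [if_neg hc]
      simp only [pvFindPos, hgd, if_neg hc]

-- A's loop, started in the shifted state reached after its first iteration, ends in the shifted
-- state at the insertion position.
theorem pvALoop_eq (P S : List Int) (x : Int) :
    ∀ (p : Nat), p < P.length →
      pvALoop (P.take (p+1) ++ P.drop p ++ S) x (P.length : Int) ((P.length : Int) - p)
      = (P.take (pvFindPos P x p + 1) ++ P.drop (pvFindPos P x p) ++ S,
         (P.length : Int) - (pvFindPos P x p)) := by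
  intro p
  induction p with
  | zero =>
    intro h0
    rw [pvALoop]
    have hidx : (P.length : Int) - 1 - ((P.length : Int) - ((0:Nat):Int)) = -1 := by push_cast; ring
    rw [hidx]
    cases hg : PySem.List.pyGet? (P.take (0+1) ++ P.drop 0 ++ S) (-1) with
    | none => simp [pvFindPos]
    | some v =>
      simp only []
      rw [if_neg (by intro hcon; exact absurd hcon.2 (by norm_num))]
      simp [pvFindPos]
  | succ q ih =>
    intro hp
    have hq : q < P.length := by omega
    rw [pvALoop]
    have h1 : (P.length : Int) - 1 - ((P.length : Int) - ((q+1:Nat):Int)) = ((q:Nat):Int) := by push_cast; ring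
    have hlen : (P.take (q+1+1)).length = q+2 := by simp; omega
    have hget : ((P.take (q+1+1) ++ P.drop (q+1) ++ S))[q]? = some P[q] := by
      rw [List.getElem?_append_left (by simp; omega),
          List.getElem?_append_left (by simp; omega),
          List.getElem?_take]
      simp [List.getElem?_eq_getElem hq]
    rw [h1, PySem.List.pyGet?_natCast, hget]
    simp only []
    by_cases hc : P[q] > x
    · rw [if_pos ⟨hc, by omega⟩]
      have h2 : (P.length:Int) - ((P.length:Int) - ((q+1:Nat):Int)) = ((q+1:Nat):Int) := by
        push_cast; ring
      have h3 : (P.length:Int) - ((q+1:Nat):Int) + 1 = (P.length:Int) - ((q:Nat):Int) := by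
        push_cast; ring
      have ht : P.take (q+1+1) = P.take (q+1) ++ [P[q+1]] := by
        rw [List.take_succ]; simp [List.getElem?_eq_getElem hp]
      have hset : (P.take (q+1+1) ++ P.drop (q+1) ++ S).set (q+1) P[q]
          = P.take (q+1) ++ P.drop q ++ S := by
        rw [List.set_append, if_pos (by simp <;> omega),
            List.set_append, if_pos (by simp <;> omega), ht,
            List.set_append, if_neg (by simp <;> omega)]
        simp only [List.length_take]
        have hz : q + 1 - min (q+1) P.length = 0 := by omega
        rw [hz, List.set_cons_zero, List.drop_eq_getElem_cons hq]
        simp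
      rw [h2, PySem.List.pySetD_natCast, hset, h3, ih hq]
      have hfp : pvFindPos P x (q+1) = pvFindPos P x q := by
        simp only [pvFindPos, List.getD_eq_getElem P 0 hq]
        rw [if_pos hc]
      rw [hfp]
    · rw [if_neg (by tauto)]
      have hfp : pvFindPos P x (q+1) = q+1 := by
        simp only [pvFindPos, List.getD_eq_getElem P 0 hq]
        rw [if_neg hc]
      rw [hfp]

-- ===== VERDICT (by name: the statement is the Claim_ definition above) =====
theorem insertion_sort_one_pass_spec : Claim_equal_insertion_sort_one_pass := by
  intro a idx _ hpre
  unfold Spec_insertion_sort_one_pass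
  rcases hpre with ⟨hlo, hhi⟩
  by_cases hneg : idx < 0
  · -- idx < 0 (and -len < idx): A's loop never runs, B's scan stays at idx;
    -- both write current back to its own slot.
    have hj : PySem.List.pyIdx? a.length idx = some (a.length - (-idx).toNat) := by
      unfold PySem.List.pyIdx?
      rw [if_neg (by omega), if_pos (by omega)]
    have hjlt : a.length - (-idx).toNat < a.length := by omega
    have hget : PySem.List.pyGet? a idx = some a[a.length - (-idx).toNat] := by
      simp [PySem.List.pyGet?, hj, List.getElem?_eq_getElem hjlt]
    unfold insertion_sort_one_pass insertion_sort_one_pass_alt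
    rw [hget]
    simp only []
    have hloop : pvALoop a a[a.length - (-idx).toNat] idx 0 = (a, 0) := by
      rw [pvALoop]
      cases hg : PySem.List.pyGet? a (idx - 1 - 0) with
      | none => rfl
      | some v => simp only []; rw [if_neg (by omega)]
    have hscan : pvBScan a a[a.length - (-idx).toNat] idx = idx := by
      rw [pvBScan, dif_neg (by omega)]
    rw [hloop, hscan]
    have hmid : PySem.List.slice a (some idx) (some idx) = [] := by
      apply List.eq_nil_of_length_eq_zero
      rw [PySem.List.length_slice]
      omega
    have h1 : PySem.List.slice a none (some (idx + 1)) = a.take (PySem.List.clampIdx a.length (idx + 1)) := by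
      simp [PySem.List.slice]
    have h3 : PySem.List.slice a (some (idx + 1)) none = a.drop (PySem.List.clampIdx a.length (idx + 1)) := by
      simp [PySem.List.slice]
    rw [hmid, h1, h3]
    simp only [List.append_nil]
    rw [List.take_append_drop]
    have hidx : idx - 1 - 0 + 1 = idx := by ring
    rw [hidx]
  · -- 0 ≤ idx < len
    push_neg at hneg
    obtain ⟨i, rfl⟩ : ∃ i : Nat, idx = (i : Int) := ⟨idx.toNat, (Int.toNat_of_nonneg hneg).symm⟩
    have hi : i < a.length := by exact_mod_cast hhi
    have hget : PySem.List.pyGet? a (i : Int) = some a[i] := by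
      rw [PySem.List.pyGet?_natCast, List.getElem?_eq_getElem hi]
    unfold insertion_sort_one_pass insertion_sort_one_pass_alt
    rw [hget]
    simp only []
    cases i with
    | zero =>
      have hloop : pvALoop a a[0] ((0:Nat) : Int) 0 = (a, 0) := by
        rw [pvALoop]
        cases hg : PySem.List.pyGet? a (((0:Nat) : Int) - 1 - 0) with
        | none => rfl
        | some v => simp only []; rw [if_neg (by omega)]
      have hscan : pvBScan a a[0] ((0:Nat) : Int) = ((0:Nat) : Int) := by
        rw [pvBScan, dif_neg (by omega)]
      rw [hloop, hscan]
      have hmid : PySem.List.slice a (some ((0:Nat) : Int)) (some ((0:Nat) : Int)) = [] := by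
        apply List.eq_nil_of_length_eq_zero
        rw [PySem.List.length_slice]
        omega
      have h1 : PySem.List.slice a none (some (((0:Nat) : Int) + 1)) = a.take 1 := by
        rw [show (((0:Nat) : Int) + 1) = ((1:Nat) : Int) by norm_num, PySem.List.slice_to_natCast]
      have h3 : PySem.List.slice a (some (((0:Nat) : Int) + 1)) none = a.drop 1 := by
        rw [show (((0:Nat) : Int) + 1) = ((1:Nat) : Int) by norm_num, PySem.List.slice_from_natCast]
      rw [hmid, h1, h3]
      simp only [List.append_nil]
      rw [List.take_append_drop]
      norm_num
    | succ t =>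
      set P := a.take (t+1) with hP
      set S := a.drop (t+1+1) with hS
      have hPlen : P.length = t+1 := by rw [hP, List.length_take]; omega
      have ha : a = P ++ a[t+1] :: S := by
        rw [hP, hS]
        conv_lhs => rw [← List.take_append_drop (t+1) a]
        rw [List.drop_eq_getElem_cons hi]
      have ht : t < a.length := by omega
      have hgett : PySem.List.pyGet? a (((t+1:Nat) : Int) - 1 - 0) = some a[t] := by
        rw [show ((t+1:Nat) : Int) - 1 - 0 = ((t:Nat) : Int) by push_cast; ring,
            PySem.List.pyGet?_natCast, List.getElem?_eq_getElem ht]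
      have hgett' : PySem.List.pyGet? a (((t+1:Nat) : Int) - 1) = some a[t] := by
        rw [show ((t+1:Nat) : Int) - 1 = ((t:Nat) : Int) by push_cast; ring,
            PySem.List.pyGet?_natCast, List.getElem?_eq_getElem ht]
      by_cases hc : a[t] > a[t+1]
      · -- the loop runs at least once
        have hPt : P[t]'(by omega) = a[t] := by simp [hP]
        have hstate : PySem.List.pySetD a (((t+1:Nat) : Int) - 0) a[t]
            = P.take (t+1) ++ P.drop t ++ S := by
          rw [show ((t+1:Nat) : Int) - 0 = ((t+1:Nat) : Int) by ring, PySem.List.pySetD_natCast]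
          have h4 : P.take (t+1) = P := by rw [List.take_of_length_le (by omega)]
          have h5 : P.drop t = [a[t]] := by
            rw [List.drop_eq_getElem_cons (by omega), hPt]
            simp [hPlen]
          rw [h4, h5]
          have hgen : ∀ v : Int, a.set (t+1) v = P ++ v :: S := by
            intro v
            conv_lhs => rw [ha]
            rw [List.set_append, if_neg (by omega), hPlen]
            simp
          rw [hgen]
          simp
        have hfple : pvFindPos P a[t+1] t ≤ t := pvFindPos_le P a[t+1] t
        have hloop := pvALoop_eq P S a[t+1] t (by omega)
        rw [hPlen] at hloop
        have hloop' : pvALoop (P.take (t+1) ++ P.drop t ++ S) a[t+1] ((t+1:Nat) : Int) (0 + 1)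
            = (P.take (pvFindPos P a[t+1] t + 1) ++ P.drop (pvFindPos P a[t+1] t) ++ S,
               ((t+1:Nat) : Int) - (pvFindPos P a[t+1] t : Nat)) := by
          rw [show ((0:Int) + 1) = ((t+1:Nat) : Int) - ((t:Nat) : Int) by push_cast; ring]
          exact hloop
        have hsc := pvBScan_eq P S a[t+1] t (by omega)
        rw [← ha] at hsc
        have hscanA : pvBScan a a[t+1] ((t+1:Nat) : Int) = ((pvFindPos P a[t+1] t : Nat) : Int) := by
          rw [pvBScan, dif_pos (by omega), hgett']
          simp only []
          rw [if_pos hc,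
              show ((t+1:Nat) : Int) - 1 = ((t:Nat) : Int) by push_cast; ring]
          exact hsc
        rw [pvALoop]
        rw [hgett]
        simp only []
        rw [if_pos ⟨hc, by omega⟩, hstate, hloop', hscanA]
        set fp := pvFindPos P a[t+1] t with hfp
        have hidxA : ((t+1:Nat) : Int) - 1 - (((t+1:Nat) : Int) - (fp : Nat)) + 1 = ((fp : Nat) : Int) := by
          push_cast; ring
        rw [hidxA]
        -- B's three slices rebuild exactly A's post-loop state
        have hb1 : PySem.List.slice a none (some (((fp:Nat) : Int) + 1)) = P.take (fp + 1) := by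
          rw [show (((fp:Nat) : Int) + 1) = ((fp+1 : Nat) : Int) by push_cast; ring,
              PySem.List.slice_to_natCast]
          have hg1 : ∀ v : Int, (P ++ v :: S).take (fp+1) = P.take (fp+1) :=
            fun v => List.take_append_of_le_length (by omega)
          conv_lhs => rw [ha, hg1]
        have hb2 : PySem.List.slice a (some ((fp:Nat) : Int)) (some ((t+1:Nat) : Int)) = P.drop fp := by
          rw [PySem.List.slice_natCast]
          have hg2 : ∀ v : Int, ((P ++ v :: S).drop fp).take (t+1-fp) = P.drop fp := by
            intro v
            rw [List.drop_append_of_le_length (by omega)]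
            rw [List.take_append_of_le_length (by simp [hPlen])]
            rw [List.take_of_length_le (by simp [hPlen])]
          conv_lhs => rw [ha, hg2]
        have hb3 : PySem.List.slice a (some (((t+1:Nat) : Int) + 1)) none = S := by
          rw [show (((t+1:Nat) : Int) + 1) = ((t+1+1 : Nat) : Int) by push_cast; ring,
              PySem.List.slice_from_natCast, hS]
        rw [hb1, hb2, hb3]
      · -- the loop does not run
        have hloop : pvALoop a a[t+1] ((t+1:Nat) : Int) 0 = (a, 0) := by
          rw [pvALoop, hgett]
          simp only []
          rw [if_neg (by intro hcon; exact hc hcon.1)]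
        have hscan : pvBScan a a[t+1] ((t+1:Nat) : Int) = ((t+1:Nat) : Int) := by
          rw [pvBScan, dif_pos (by omega), hgett']
          simp only []
          rw [if_neg hc]
        rw [hloop, hscan]
        have hmid : PySem.List.slice a (some ((t+1:Nat) : Int)) (some ((t+1:Nat) : Int)) = [] := by
          apply List.eq_nil_of_length_eq_zero
          rw [PySem.List.length_slice]
          omega
        have h1 : PySem.List.slice a none (some (((t+1:Nat) : Int) + 1)) = a.take (t+1+1) := by
          rw [show (((t+1:Nat) : Int) + 1) = ((t+1+1 : Nat) : Int) by push_cast; ring,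
              PySem.List.slice_to_natCast]
        have h3 : PySem.List.slice a (some (((t+1:Nat) : Int) + 1)) none = a.drop (t+1+1) := by
          rw [show (((t+1:Nat) : Int) + 1) = ((t+1+1 : Nat) : Int) by push_cast; ring,
              PySem.List.slice_from_natCast]
        rw [hmid, h1, h3]
        simp only [List.append_nil]
        rw [List.take_append_drop]
        congr 1
        push_cast
        ring
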